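-- pv_equiv track=rewrite | github.com/zofialuther/CS8395-08-Paper1-updated | data/translated-code/pseudo-to-python/prolog/Soundex.py | chk_digit
-- ===== SOURCE A (Python) =====
-- def chk_digit(T, Tr):
--     if len(T) > 1:
--         H = T[0]
--         D = T[1]
--         if ord('0') <= ord(D) <= ord('9'):
--             return chk_digit(T[2:], Tr)
--         else:
--             Tr.append(H)
--             return chk_digit(T[1:], Tr)
--     else:
--         return Tr
-- ===== SOURCE B (Python) =====
-- def chk_digit(T, Tr):
--     i = 0
--     n = len(T)
--     while i + 1 < n:
--         if '0' <= T[i + 1] <= '9':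
--             i += 2
--         else:
--             Tr.append(T[i])
--             i += 1
--     return Tr
-- ===== Notes on version B (the rewrite author's own statement) =====
-- stated objective: faster
-- what changed: Replaced recursion with string slicing (each step copies the tail) by a single iterative pass over an index, appending to Tr in the same order.
import Mathlib
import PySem

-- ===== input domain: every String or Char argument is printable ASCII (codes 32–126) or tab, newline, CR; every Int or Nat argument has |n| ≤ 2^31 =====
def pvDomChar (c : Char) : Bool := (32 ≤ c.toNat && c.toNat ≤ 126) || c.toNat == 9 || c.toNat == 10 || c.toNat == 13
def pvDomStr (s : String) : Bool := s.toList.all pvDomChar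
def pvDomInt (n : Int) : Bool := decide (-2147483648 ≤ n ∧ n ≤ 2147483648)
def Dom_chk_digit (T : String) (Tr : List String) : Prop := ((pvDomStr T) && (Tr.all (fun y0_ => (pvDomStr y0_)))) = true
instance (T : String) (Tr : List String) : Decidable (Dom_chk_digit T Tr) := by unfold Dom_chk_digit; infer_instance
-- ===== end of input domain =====

-- B replaces A's O(n^2) recursion-with-slicing by one O(n) index-walking loop; both append to Tr
-- identically, so the in-place mutation of Tr is the same and the proof is about the returned value.

-- ===== PORT A =====
-- A's recursion on the character list of T: T[0]=h, T[1]=d, T[2:]=rest, T[1:]=d::rest.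
def chkA : List Char → List String → List String
  | h :: d :: rest, tr =>
      if '0' ≤ d ∧ d ≤ '9' then chkA rest tr
      else chkA (d :: rest) (tr ++ [String.mk [h]])
  | _, tr => tr
termination_by cs _ => cs.length

def chk_digit (T : String) (Tr : List String) : List String := chkA T.toList Tr

-- ===== PORT B =====
-- B's while-loop: index i over the fixed list cs (length n); cs[i+1] is always in range when i+1 < n,
-- so List.getD transcribes the (never-failing) Python index exactly.
def chkBloop (cs : List Char) (n : Nat) (i : Nat) (tr : List String) : List String :=
  if _h : i + 1 < n then
    if '0' ≤ cs.getD (i + 1) ' ' ∧ cs.getD (i + 1) ' ' ≤ '9' then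
      chkBloop cs n (i + 2) tr
    else
      chkBloop cs n (i + 1) (tr ++ [String.mk [cs.getD i ' ']])
  else tr
termination_by n - i

def chk_digit_alt (T : String) (Tr : List String) : List String :=
  chkBloop T.toList T.toList.length 0 Tr

-- ===== PRECONDITION & SPEC =====
def Spec_chk_digit (T : String) (Tr : List String) (out : List String) : Prop := out = chk_digit_alt T Tr
instance (T : String) (Tr : List String) (out : List String) : Decidable (Spec_chk_digit T Tr out) := by unfold Spec_chk_digit; infer_instance

-- ===== CLAIM (what is proved, stated in full; the proofs are below) =====
def Claim_equal_chk_digit : Prop := ∀ (T : String) (Tr : List String), Dom_chk_digit T Tr → Spec_chk_digit T Tr (chk_digit T Tr)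

-- ===== LEMMAS AND PROOFS =====

-- Invariant: B's loop from index i computes A's recursion on the suffix cs.drop i.
theorem chkBloop_eq_chkA (cs : List Char) (i : Nat) (tr : List String) :
    chkBloop cs cs.length i tr = chkA (cs.drop i) tr := by
  induction hn : cs.length - i using Nat.strong_induction_on generalizing i tr with
  | _ k ih =>
    subst hn
    rw [chkBloop]
    by_cases h : i + 1 < cs.length
    · have hi : i < cs.length := by omega
      have hdrop : cs.drop i = cs[i] :: cs[i+1] :: cs.drop (i + 2) := by
        rw [List.drop_eq_getElem_cons hi, List.drop_eq_getElem_cons h]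
      have g1 : cs.getD (i + 1) ' ' = cs[i+1] := List.getD_eq_getElem cs ' ' h
      have g0 : cs.getD i ' ' = cs[i] := List.getD_eq_getElem cs ' ' hi
      simp only [h, dif_pos, g0, g1, hdrop, chkA]
      by_cases hd : '0' ≤ cs[i+1] ∧ cs[i+1] ≤ '9'
      · simp only [hd]
        exact ih (cs.length - (i + 2)) (by omega) (i + 2) tr rfl
      · simp only [hd, if_neg, not_false_iff]
        have := ih (cs.length - (i + 1)) (by omega) (i + 1) (tr ++ [String.mk [cs[i]]]) rfl
        rw [this, List.drop_eq_getElem_cons h]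
    · simp only [h, dif_neg, not_false_iff]
      have : (cs.drop i).length ≤ 1 := by simp; omega
      cases hcs : cs.drop i with
      | nil => rw [chkA]; intro _ _ _ hx; cases hx
      | cons a l =>
        cases l with
        | nil => rw [chkA]; intro _ _ _ hx; cases hx
        | cons b l' => rw [hcs] at this; simp at this

-- ===== VERDICT (by name: the statement is the Claim_ definition above) =====
theorem chk_digit_spec : Claim_equal_chk_digit := by
  intro T Tr _
  unfold Spec_chk_digit chk_digit chk_digit_alt
  rw [chkBloop_eq_chkA, List.drop_zero]
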